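-- pv_equiv track=rewrite | github.com/writecrow/crow_training | python/better_coding/passive_voice_functions.py | is_passive_sentence
-- ===== SOURCE A (Python) =====
-- def is_passive_sentence(sentence):
--   VERBS = ['is', 'was', 'were', 'be', 'being', 'been', 'have']
--   passive = False
--   words = sentence.split()
--   if len(words) > 0:
--     match = bool(set(VERBS) & set(words))
--     if match:
--       verb = False
--       for word in words:
--         past_tense = word[-2:] == 'ed'
--         if verb and past_tense:
--           passive = True
--           break
--         elif word in VERBS:
--           verb = True
--         else:
--           verb = False
--   return passive
-- ===== SOURCE B (Python) =====
-- def is_passive_sentence(sentence):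
--     VERBS = ['is', 'was', 'were', 'be', 'being', 'been', 'have']
--     words = sentence.split()
--     verb_next = {i + 1 for i, w in enumerate(words) if w in VERBS}
--     ed_at = {i for i, w in enumerate(words) if w[-2:] == 'ed'}
--     return bool(verb_next & ed_at)
-- ===== Notes on version B (the rewrite author's own statement) =====
-- stated objective: alternative
-- what changed: Replaced the stateful flag loop (with its redundant set-intersection guard) by an index-set formulation: build the set of positions right after a verb and the set of positions of past-tense-suffixed words in two staged comprehensions, and answer by set intersection.
import Mathlib
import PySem

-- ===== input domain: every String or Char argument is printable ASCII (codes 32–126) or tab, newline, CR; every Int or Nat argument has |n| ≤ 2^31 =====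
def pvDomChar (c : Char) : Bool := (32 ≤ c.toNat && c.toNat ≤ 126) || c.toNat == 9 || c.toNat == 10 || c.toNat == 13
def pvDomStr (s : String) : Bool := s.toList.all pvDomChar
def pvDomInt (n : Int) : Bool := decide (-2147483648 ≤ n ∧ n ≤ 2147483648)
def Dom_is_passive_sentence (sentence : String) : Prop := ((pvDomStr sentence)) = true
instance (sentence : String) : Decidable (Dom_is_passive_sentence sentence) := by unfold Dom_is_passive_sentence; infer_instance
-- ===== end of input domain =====

-- B replaces A's stateful verb-flag loop (and its redundant membership guard) by two staged
-- index-set comprehensions answered with a set intersection; objective: alternative.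

-- ===== PORT A =====
def pvVERBS_A : List String := ["is", "was", "were", "be", "being", "been", "have"]

-- the 'for word in words' loop with its 'verb' flag and break
def pvALoop : List String → Bool → Bool
  | [], _ => false
  | word :: rest, verb =>
    let past_tense : Bool := PySem.Str.slice word (some (-2)) none == "ed"
    if verb && past_tense then true
    else pvALoop rest (pvVERBS_A.contains word)

def is_passive_sentence (sentence : String) : Bool :=
  let words := PySem.Str.split₀ sentence
  if words.length > 0 then
    -- bool(set(VERBS) & set(words))
    let mtch : Bool := !(PySem.Set.inter (PySem.Set.ofList pvVERBS_A) (PySem.Set.ofList words)).isEmpty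
    if mtch then pvALoop words false else false
  else false

-- ===== PORT B =====
def pvVERBS_B : List String := ["is", "was", "were", "be", "being", "been", "have"]

def is_passive_sentence_alt (sentence : String) : Bool :=
  let words := PySem.Str.split₀ sentence
  -- {i + 1 for i, w in enumerate(words) if w in VERBS}
  let verb_next : PySem.Set Int :=
    PySem.Set.ofList (((PySem.List.enumerate words).filter (fun p => pvVERBS_B.contains p.2)).map (fun p => p.1 + 1))
  -- {i for i, w in enumerate(words) if w[-2:] == 'ed'}
  let ed_at : PySem.Set Int :=
    PySem.Set.ofList (((PySem.List.enumerate words).filter (fun p => PySem.Str.slice p.2 (some (-2)) none == "ed")).map (fun p => p.1))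
  !(PySem.Set.inter verb_next ed_at).isEmpty

-- ===== PRECONDITION & SPEC =====
def Spec_is_passive_sentence (sentence : String) (out : Bool) : Prop := out = is_passive_sentence_alt sentence
instance (sentence : String) (out : Bool) : Decidable (Spec_is_passive_sentence sentence out) := by unfold Spec_is_passive_sentence; infer_instance

-- ===== CLAIM (what is proved, stated in full; the proofs are below) =====
def Claim_equal_is_passive_sentence : Prop := ∀ (sentence : String), Dom_is_passive_sentence sentence → Spec_is_passive_sentence sentence (is_passive_sentence sentence)

-- ===== LEMMAS AND PROOFS =====

-- proof-only helper: 'some adjacent pair (verb, ed-word)' as a structural recursion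
def pvAdj : List String → Bool
  | w :: nxt :: rest =>
    (pvVERBS_A.contains w && (PySem.Str.slice nxt (some (-2)) none == "ed")) || pvAdj (nxt :: rest)
  | _ => false

-- 'ed of the head word', the part of A's state that survives one step
def pvHeadEd : List String → Bool
  | [] => false
  | w :: _ => PySem.Str.slice w (some (-2)) none == "ed"

lemma pvALoop_eq (ws : List String) : ∀ v : Bool,
    pvALoop ws v = ((v && pvHeadEd ws) || pvAdj ws) := by
  induction ws with
  | nil => intro v; simp [pvALoop, pvHeadEd, pvAdj]
  | cons w rest ih =>
    intro v
    have hb : pvAdj (w :: rest) =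
        ((pvVERBS_A.contains w && pvHeadEd rest) || pvAdj rest) := by
      cases rest with
      | nil => simp [pvAdj, pvHeadEd]
      | cons n r => simp [pvAdj, pvHeadEd]
    rw [pvALoop, ih (pvVERBS_A.contains w), hb]
    show (if (v && (PySem.Str.slice w (some (-2)) none == "ed")) = true then true
          else ((pvVERBS_A.contains w && pvHeadEd rest) || pvAdj rest)) = _
    cases hvp : (v && (PySem.Str.slice w (some (-2)) none == "ed")) <;>
      simp [hvp, pvHeadEd]

lemma pvAdj_no_verb (ws : List String) (h : ∀ w ∈ ws, pvVERBS_A.contains w = false) :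
    pvAdj ws = false := by
  induction ws with
  | nil => rfl
  | cons w rest ih =>
    cases rest with
    | nil => rfl
    | cons n r =>
      have hw : w ∉ pvVERBS_A := by simpa using h w (by simp)
      have := ih (fun x hx => h x (List.mem_cons_of_mem _ hx))
      simp [pvAdj, this, hw]

-- index characterisation of pvAdj
lemma pvAdj_iff (ws : List String) :
    pvAdj ws = true ↔ ∃ k : Nat, ∃ h : k + 1 < ws.length,
      (pvVERBS_A.contains ws[k] &&
       (PySem.Str.slice ws[k + 1] (some (-2)) none == "ed")) = true := by
  induction ws with
  | nil => simp [pvAdj]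
  | cons w rest ih =>
    cases rest with
    | nil =>
      simp [pvAdj]
    | cons n r =>
      rw [show pvAdj (w :: n :: r) =
          ((pvVERBS_A.contains w && (PySem.Str.slice n (some (-2)) none == "ed")) || pvAdj (n :: r)) from rfl]
      constructor
      · intro h
        rcases Bool.or_eq_true_iff.mp h with h0 | h1
        · exact ⟨0, by simp, by simpa using h0⟩
        · rcases (ih).mp h1 with ⟨k, hk, hP⟩
          exact ⟨k + 1, by simpa using Nat.succ_lt_succ hk, by simpa using hP⟩
      · rintro ⟨k, hk, hP⟩
        cases k with
        | zero => exact Bool.or_eq_true_iff.mpr (Or.inl (by simpa using hP))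
        | succ k =>
          refine Bool.or_eq_true_iff.mpr (Or.inr (ih.mpr ⟨k, ?_, ?_⟩))
          · simpa using Nat.lt_of_succ_lt_succ hk
          · simpa using hP

-- index characterisation of B
lemma pvAlt_iff (ws : List String) :
    (!(PySem.Set.inter
        (PySem.Set.ofList (((PySem.List.enumerate ws).filter (fun p => pvVERBS_B.contains p.2)).map (fun p => p.1 + 1)))
        (PySem.Set.ofList (((PySem.List.enumerate ws).filter (fun p => PySem.Str.slice p.2 (some (-2)) none == "ed")).map (fun p => p.1)))).isEmpty) = true ↔
    ∃ k : Nat, ∃ h : k + 1 < ws.length,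
      (pvVERBS_A.contains ws[k] &&
       (PySem.Str.slice ws[k + 1] (some (-2)) none == "ed")) = true := by
  rw [Bool.not_eq_true', Bool.eq_false_iff, Ne, List.isEmpty_iff, ← ne_eq]
  constructor
  · intro hne
    obtain ⟨x, hx⟩ := List.exists_mem_of_ne_nil _ hne
    rw [PySem.Set.mem_inter, PySem.Set.mem_ofList, PySem.Set.mem_ofList] at hx
    obtain ⟨h1, h2⟩ := hx
    rcases List.mem_map.mp h1 with ⟨p, hp, hpx⟩
    rcases List.mem_filter.mp hp with ⟨hpmem, hpverb⟩
    rcases (PySem.List.mem_enumerate_iff _ _ _).mp hpmem with ⟨k, hk, rfl⟩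
    rcases List.mem_map.mp h2 with ⟨q, hq, hqx⟩
    rcases List.mem_filter.mp hq with ⟨hqmem, hqed⟩
    rcases (PySem.List.mem_enumerate_iff _ _ _).mp hqmem with ⟨j, hj, rfl⟩
    simp only at hpx hqx hpverb hqed
    have hjk : j = k + 1 := by
      have : (0 : Int) + k + 1 = 0 + j := by rw [hpx, hqx]
      omega
    subst hjk
    refine ⟨k, hj, ?_⟩
    rw [Bool.and_eq_true]
    exact ⟨by simpa [pvVERBS_A, pvVERBS_B] using hpverb, hqed⟩
  · rintro ⟨k, hk, hP⟩
    rw [Bool.and_eq_true] at hP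
    refine List.ne_nil_of_mem (a := ((0 : Int) + k) + 1) ?_
    rw [PySem.Set.mem_inter, PySem.Set.mem_ofList, PySem.Set.mem_ofList]
    constructor
    · exact List.mem_map.mpr ⟨((0 : Int) + k, ws[k]), List.mem_filter.mpr
        ⟨(PySem.List.mem_enumerate_iff _ _ _).mpr ⟨k, by omega, rfl⟩, by simpa [pvVERBS_A, pvVERBS_B] using hP.1⟩, rfl⟩
    · refine List.mem_map.mpr ⟨((0 : Int) + (k + 1), ws[k + 1]), List.mem_filter.mpr
        ⟨(PySem.List.mem_enumerate_iff _ _ _).mpr ⟨k + 1, hk, rfl⟩, hP.2⟩, by push_cast; ring⟩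

lemma pvAlt_eq_adj (ws : List String) :
    (!(PySem.Set.inter
        (PySem.Set.ofList (((PySem.List.enumerate ws).filter (fun p => pvVERBS_B.contains p.2)).map (fun p => p.1 + 1)))
        (PySem.Set.ofList (((PySem.List.enumerate ws).filter (fun p => PySem.Str.slice p.2 (some (-2)) none == "ed")).map (fun p => p.1)))).isEmpty)
    = pvAdj ws := by
  rw [Bool.eq_iff_iff, pvAlt_iff, pvAdj_iff]

-- ===== VERDICT (by name: the statement is the Claim_ definition above) =====
theorem is_passive_sentence_spec : Claim_equal_is_passive_sentence := by
  intro sentence _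
  unfold Spec_is_passive_sentence is_passive_sentence is_passive_sentence_alt
  set words := PySem.Str.split₀ sentence with hwords
  rw [pvAlt_eq_adj words]
  by_cases hlen : words.length > 0
  · simp only [hlen, if_true]
    by_cases hm : (PySem.Set.inter (PySem.Set.ofList pvVERBS_A) (PySem.Set.ofList words)).isEmpty = true
    · -- no word of the sentence is a VERB, so no adjacent (verb, ed) pair exists either
      simp only [hm, Bool.not_true]
      have hno : ∀ w ∈ words, pvVERBS_A.contains w = false := by
        intro w hw
        by_contra hc
        have hcw : pvVERBS_A.contains w = true := by
          cases h : pvVERBS_A.contains w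
          · exact absurd h hc
          · rfl
        have hmem : w ∈ PySem.Set.inter (PySem.Set.ofList pvVERBS_A) (PySem.Set.ofList words) := by
          rw [PySem.Set.mem_inter, PySem.Set.mem_ofList, PySem.Set.mem_ofList]
          exact ⟨by simpa using hcw, hw⟩
        rw [List.isEmpty_iff] at hm
        simp [hm] at hmem
      exact (pvAdj_no_verb words hno).symm
    · simp only [hm, Bool.not_false, if_true]
      rw [pvALoop_eq words false]
      simp
  · simp only [hlen, if_false]
    have : words = [] := List.eq_nil_of_length_eq_zero (by omega)
    rw [this]
    rfl
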